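-- pv_equiv track=rewrite | github.com/phipsi99/Advent-of-Code-2015 | 25/main.py | calc_index
-- ===== SOURCE A (Python) =====
-- def calc_index(row, col):
--     row_result = 1
--     for i in range(1, row):
--         row_result += i
--     col_result = row_result
--     for i in range(1, col):
--         col_result += row + i
--     return col_result-1
-- ===== SOURCE B (Python) =====
-- def calc_index(row, col):
--     r = max(row - 1, 0)
--     c = max(col - 1, 0)
--     return r * (r + 1) // 2 + c * row + c * (c + 1) // 2
-- ===== Notes on version B (the rewrite author's own statement) =====
-- stated objective: faster
-- what changed: Replaced A's two accumulation loops over range(1,row) and range(1,col) with the closed-form triangular-number formula r*(r+1)//2 + c*row + c*(c+1)//2 where r=max(row-1,0), c=max(col-1,0).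
import Mathlib
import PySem

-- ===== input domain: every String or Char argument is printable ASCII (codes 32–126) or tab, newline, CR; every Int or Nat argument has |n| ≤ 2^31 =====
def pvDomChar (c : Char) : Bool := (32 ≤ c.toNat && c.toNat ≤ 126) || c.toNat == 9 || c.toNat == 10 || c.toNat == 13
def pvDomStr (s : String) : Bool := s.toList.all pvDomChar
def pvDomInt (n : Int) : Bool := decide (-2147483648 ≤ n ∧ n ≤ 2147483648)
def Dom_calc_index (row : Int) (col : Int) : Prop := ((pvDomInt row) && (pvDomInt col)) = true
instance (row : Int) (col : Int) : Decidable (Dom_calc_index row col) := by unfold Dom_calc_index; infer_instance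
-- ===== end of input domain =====

-- B replaces A's two summation loops by the closed-form triangular-number formula (O(1) instead of O(row+col)).

-- ===== PORT A =====
def calc_index (row : Int) (col : Int) : Int :=
  let row_result : Int := (PySem.List.pyRange 1 row 1).foldl (fun acc i => acc + i) 1
  let col_result : Int := (PySem.List.pyRange 1 col 1).foldl (fun acc i => acc + (row + i)) row_result
  col_result - 1

-- ===== PORT B =====
def calc_index_alt (row : Int) (col : Int) : Int :=
  let r := max (row - 1) 0
  let c := max (col - 1) 0
  PySem.Int.floordiv (r * (r + 1)) 2 + c * row + PySem.Int.floordiv (c * (c + 1)) 2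

-- ===== PRECONDITION & SPEC =====
def Spec_calc_index (row : Int) (col : Int) (out : Int) : Prop := out = calc_index_alt row col
instance (row : Int) (col : Int) (out : Int) : Decidable (Spec_calc_index row col out) := by unfold Spec_calc_index; infer_instance

-- ===== CLAIM (what is proved, stated in full; the proofs are below) =====
def Claim_equal_calc_index : Prop := ∀ (row : Int) (col : Int), Dom_calc_index row col → Spec_calc_index row col (calc_index row col)

-- ===== LEMMAS AND PROOFS =====

-- Gauss-style sum, in doubled form to avoid division: 2 * Σ_{k<n} f k = 2nc + n(n-1) when f k = c + k
theorem pv_sum_affine (f : Nat → Int) (c : Int) (hf : ∀ k : Nat, f k = c + k) (n : Nat) :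
    2 * ((List.range n).map f).sum = 2 * n * c + n * ((n : Int) - 1) := by
  induction n with
  | zero => simp
  | succ m ih =>
    rw [List.range_succ, List.map_append, List.sum_append]
    simp only [List.map_cons, List.map_nil, List.sum_cons, List.sum_nil, hf]
    push_cast
    linarith [ih]

theorem pv_floordiv_double (k : Int) : PySem.Int.floordiv (2 * k) 2 = k := by
  rw [PySem.Int.floordiv_eq_ediv_of_pos (by norm_num)]
  exact Int.mul_ediv_cancel_left k (by norm_num)

-- ===== VERDICT (by name: the statement is the Claim_ definition above) =====
theorem calc_index_spec : Claim_equal_calc_index := by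
  intro row col _
  unfold Spec_calc_index calc_index calc_index_alt
  rw [PySem.List.foldl_add (g := fun i : Int => i)]
  simp only [PySem.List.foldl_add]
  simp only [PySem.List.pyRange_one, List.map_map, Function.comp_def]
  set r : Int := max (row - 1) 0 with hr
  set c : Int := max (col - 1) 0 with hc
  have hn1 : ((row - 1).toNat : Int) = r := by rw [hr]; omega
  have hn2 : ((col - 1).toNat : Int) = c := by rw [hc]; omega
  obtain ⟨k1, hk1⟩ := Int.even_mul_succ_self r
  obtain ⟨k2, hk2⟩ := Int.even_mul_succ_self c
  have hd1 : PySem.Int.floordiv (r * (r + 1)) 2 = k1 := by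
    rw [hk1, show k1 + k1 = 2 * k1 by ring, pv_floordiv_double]
  have hd2 : PySem.Int.floordiv (c * (c + 1)) 2 = k2 := by
    rw [hk2, show k2 + k2 = 2 * k2 by ring, pv_floordiv_double]
  have s1 := pv_sum_affine (fun k : Nat => (1 : Int) + (k : Int)) 1 (fun k => rfl) (row - 1).toNat
  have s2 := pv_sum_affine (fun k : Nat => row + ((1 : Int) + (k : Int))) (row + 1)
      (fun k => by ring) (col - 1).toNat
  rw [hn1] at s1
  rw [hn2] at s2
  rw [hd1, hd2]
  have h1 : ((List.range (row - 1).toNat).map (fun k : Nat => (1 : Int) + (k : Int))).sum = k1 := by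
    have h := s1
    have : 2 * ((List.range (row - 1).toNat).map (fun k : Nat => (1 : Int) + (k : Int))).sum = 2 * k1 := by
      linear_combination h + hk1
    linarith
  have h2 : ((List.range (col - 1).toNat).map (fun k : Nat => row + ((1 : Int) + (k : Int)))).sum
      = c * row + k2 := by
    have : 2 * ((List.range (col - 1).toNat).map (fun k : Nat => row + ((1 : Int) + (k : Int)))).sum
        = 2 * (c * row + k2) := by
      linear_combination s2 + hk2
    linarith
  rw [h1, h2]
  ring
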